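-- pv_equiv track=rewrite | github.com/pypi-data/pypi-mirror-402 | packages/malevich-app/malevich_app-0.3.60-py3-none-any.whl/malevich_app/export/jls/local.py | full_wait_bind_ids
-- ===== SOURCE A (Python) =====
-- from typing import Dict, Set, Any, Optional, List, Tuple
--
-- def full_wait_bind_ids(wait_bind_ids: Dict[str, Dict[str, Optional[bool]]], wait_bind_ids_conds:  Dict[str, List[Dict[str, bool]]], alt_wait_bind_ids: Dict[str, Dict[str, List[Dict[str, Optional[bool]]]]]) -> Dict[str, Set[str]]:
--     res = {}
--     for bind_id, deps in wait_bind_ids.items():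
--         cur_deps = res.get(bind_id)
--         if cur_deps is None:
--             cur_deps = set()
--             res[bind_id] = cur_deps
--         for dep_bind_id in deps:
--             cur_deps.add(dep_bind_id)
--     for bind_id, deps_list in wait_bind_ids_conds.items():
--         cur_deps = res.get(bind_id)
--         if cur_deps is None:
--             cur_deps = set()
--             res[bind_id] = cur_deps
--         for deps in deps_list:
--             for dep_bind_id in deps:
--                 cur_deps.add(dep_bind_id)
--     for bind_id, name_to_deps_struct in alt_wait_bind_ids.items():
--         cur_deps = res.get(bind_id)
--         if cur_deps is None:
--             cur_deps = set()
--             res[bind_id] = cur_deps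
--         for deps_list in name_to_deps_struct.values():
--             for deps in deps_list:
--                 for dep_bind_id in deps:
--                     cur_deps.add(dep_bind_id)
--     return res
-- ===== SOURCE B (Python) =====
-- def _deps_of(bind_id, wait_bind_ids, wait_bind_ids_conds, alt_wait_bind_ids):
--     deps = set(wait_bind_ids.get(bind_id, ()))
--     for cond_deps in wait_bind_ids_conds.get(bind_id, ()):
--         deps.update(cond_deps)
--     for deps_list in alt_wait_bind_ids.get(bind_id, {}).values():
--         for alt_deps in deps_list:
--             deps.update(alt_deps)
--     return deps
--
--
-- def full_wait_bind_ids(wait_bind_ids, wait_bind_ids_conds, alt_wait_bind_ids):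
--     all_ids = dict.fromkeys([*wait_bind_ids, *wait_bind_ids_conds, *alt_wait_bind_ids])
--     return {bind_id: _deps_of(bind_id, wait_bind_ids, wait_bind_ids_conds, alt_wait_bind_ids)
--             for bind_id in all_ids}
-- ===== Notes on version B (the rewrite author's own statement) =====
-- stated objective: alternative
-- what changed: A makes three source-ordered passes that mutate per-key sets stored in the result dict; B first forms the ordered union of all top-level bind_ids and then makes one key-ordered pass, gathering each key's dependencies from the three sources with lookups.
import Mathlib
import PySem

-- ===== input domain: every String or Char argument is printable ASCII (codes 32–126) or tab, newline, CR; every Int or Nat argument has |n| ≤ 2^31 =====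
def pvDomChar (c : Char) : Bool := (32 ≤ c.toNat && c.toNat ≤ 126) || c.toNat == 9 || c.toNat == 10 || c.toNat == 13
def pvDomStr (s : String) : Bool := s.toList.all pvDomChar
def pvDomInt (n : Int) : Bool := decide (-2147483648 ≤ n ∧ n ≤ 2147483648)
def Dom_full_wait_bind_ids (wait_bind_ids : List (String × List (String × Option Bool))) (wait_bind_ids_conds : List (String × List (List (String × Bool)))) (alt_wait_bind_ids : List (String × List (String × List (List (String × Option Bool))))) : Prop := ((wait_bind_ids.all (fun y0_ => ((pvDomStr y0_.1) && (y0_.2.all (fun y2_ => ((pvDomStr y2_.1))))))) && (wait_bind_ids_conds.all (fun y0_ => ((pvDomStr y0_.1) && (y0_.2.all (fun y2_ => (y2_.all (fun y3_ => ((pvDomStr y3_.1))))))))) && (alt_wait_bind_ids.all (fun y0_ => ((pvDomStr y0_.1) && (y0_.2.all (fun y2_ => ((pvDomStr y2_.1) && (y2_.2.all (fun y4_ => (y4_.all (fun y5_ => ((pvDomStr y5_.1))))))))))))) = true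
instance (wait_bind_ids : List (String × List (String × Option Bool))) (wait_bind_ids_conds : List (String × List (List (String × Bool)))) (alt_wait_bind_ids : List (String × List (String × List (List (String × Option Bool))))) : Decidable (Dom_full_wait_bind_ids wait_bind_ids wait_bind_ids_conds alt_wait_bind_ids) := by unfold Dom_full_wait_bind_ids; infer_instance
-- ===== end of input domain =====

-- B replaces A's three source-ordered mutating passes by one key-ordered pass over the union
-- of the top-level keys, gathering each key's dependencies from the three sources (objective: alternative).

-- ===== PORT A =====
-- A's mutation of the set aliased into res is modeled by reading the current per-key set
-- (empty if absent), extending it, and storing it back (insert keeps an existing key's position).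
def full_wait_bind_ids (wait_bind_ids : List (String × List (String × Option Bool))) (wait_bind_ids_conds : List (String × List (List (String × Bool)))) (alt_wait_bind_ids : List (String × List (String × List (List (String × Option Bool))))) : List (String × List String) :=
  let res : PySem.Dict String (PySem.Set String) := PySem.Dict.empty
  let res := wait_bind_ids.foldl (fun res p =>
      res.insert p.1 (p.2.foldl (fun s q => PySem.Set.add s q.1) (res.getD p.1 []))) res
  let res := wait_bind_ids_conds.foldl (fun res p =>
      res.insert p.1 (p.2.foldl (fun s deps => deps.foldl (fun s q => PySem.Set.add s q.1) s) (res.getD p.1 []))) res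
  let res := alt_wait_bind_ids.foldl (fun res p =>
      res.insert p.1 (p.2.foldl (fun s nd => nd.2.foldl (fun s deps => deps.foldl (fun s q => PySem.Set.add s q.1) s) s) (res.getD p.1 []))) res
  res.items

-- ===== PORT B =====
-- Source B's _deps_of: per-key gather from the three sources ('set(d)' / 'deps.update(d)' iterate a dict's keys).
def pvGather (wait_bind_ids : List (String × List (String × Option Bool))) (wait_bind_ids_conds : List (String × List (List (String × Bool)))) (alt_wait_bind_ids : List (String × List (String × List (List (String × Option Bool))))) (bind_id : String) : PySem.Set String :=
  let deps := PySem.Set.ofList (((PySem.Dict.mk wait_bind_ids).getD bind_id []).map Prod.fst)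
  let deps := ((PySem.Dict.mk wait_bind_ids_conds).getD bind_id []).foldl
      (fun s cond_deps => PySem.Set.update s (cond_deps.map Prod.fst)) deps
  ((PySem.Dict.mk alt_wait_bind_ids).getD bind_id []).foldl
      (fun s nd => nd.2.foldl (fun s alt_deps => PySem.Set.update s (alt_deps.map Prod.fst)) s) deps

def full_wait_bind_ids_alt (wait_bind_ids : List (String × List (String × Option Bool))) (wait_bind_ids_conds : List (String × List (List (String × Bool)))) (alt_wait_bind_ids : List (String × List (String × List (List (String × Option Bool))))) : List (String × List String) :=
  let all_ids : PySem.Set String := PySem.Set.ofList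
      (wait_bind_ids.map Prod.fst ++ wait_bind_ids_conds.map Prod.fst ++ alt_wait_bind_ids.map Prod.fst)
  all_ids.map (fun bind_id => (bind_id, pvGather wait_bind_ids wait_bind_ids_conds alt_wait_bind_ids bind_id))

-- ===== PRECONDITION & SPEC =====
-- Pre_ excludes association lists with duplicate top-level keys (of the three arguments, and of the
-- inner dicts of alt_wait_bind_ids): those do not represent any Python dict, so A's behaviour there is
-- an artefact of the representation.
def Pre_full_wait_bind_ids (wait_bind_ids : List (String × List (String × Option Bool))) (wait_bind_ids_conds : List (String × List (List (String × Bool)))) (alt_wait_bind_ids : List (String × List (String × List (List (String × Option Bool))))) : Prop :=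
  (wait_bind_ids.map Prod.fst).Nodup ∧ (wait_bind_ids_conds.map Prod.fst).Nodup ∧
  (alt_wait_bind_ids.map Prod.fst).Nodup ∧ ∀ p ∈ alt_wait_bind_ids, (p.2.map Prod.fst).Nodup
instance (wait_bind_ids : List (String × List (String × Option Bool))) (wait_bind_ids_conds : List (String × List (List (String × Bool)))) (alt_wait_bind_ids : List (String × List (String × List (List (String × Option Bool))))) : Decidable (Pre_full_wait_bind_ids wait_bind_ids wait_bind_ids_conds alt_wait_bind_ids) := by unfold Pre_full_wait_bind_ids; infer_instance

def pvWitness_full_wait_bind_ids : (List (String × List (String × Option Bool))) × (List (String × List (List (String × Bool)))) × (List (String × List (String × List (List (String × Option Bool))))) :=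
  ([("a", [("x", some true)])], [("b", [[("y", false)]])], [("a", [("n", [[("z", none)]])])])

def Spec_full_wait_bind_ids (wait_bind_ids : List (String × List (String × Option Bool))) (wait_bind_ids_conds : List (String × List (List (String × Bool)))) (alt_wait_bind_ids : List (String × List (String × List (List (String × Option Bool))))) (out : List (String × List String)) : Prop := out = full_wait_bind_ids_alt wait_bind_ids wait_bind_ids_conds alt_wait_bind_ids
instance (wait_bind_ids : List (String × List (String × Option Bool))) (wait_bind_ids_conds : List (String × List (List (String × Bool)))) (alt_wait_bind_ids : List (String × List (String × List (List (String × Option Bool))))) (out : List (String × List String)) : Decidable (Spec_full_wait_bind_ids wait_bind_ids wait_bind_ids_conds alt_wait_bind_ids out) := by unfold Spec_full_wait_bind_ids; infer_instance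

-- ===== CLAIM (what is proved, stated in full; the proofs are below) =====
def Claim_equal_full_wait_bind_ids : Prop := ∀ (wait_bind_ids : List (String × List (String × Option Bool))) (wait_bind_ids_conds : List (String × List (List (String × Bool)))) (alt_wait_bind_ids : List (String × List (String × List (List (String × Option Bool))))), Dom_full_wait_bind_ids wait_bind_ids wait_bind_ids_conds alt_wait_bind_ids → Pre_full_wait_bind_ids wait_bind_ids wait_bind_ids_conds alt_wait_bind_ids → Spec_full_wait_bind_ids wait_bind_ids wait_bind_ids_conds alt_wait_bind_ids (full_wait_bind_ids wait_bind_ids wait_bind_ids_conds alt_wait_bind_ids)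

-- ===== LEMMAS AND PROOFS =====

-- A fold of read-extend-store-back inserts over distinct keys: the final per-key value is the
-- extension of the initial per-key value by the (unique) update for that key, if any.
theorem pv_foldl_insert_getD {ν : Type} (g : PySem.Set String → ν → PySem.Set String)
    (l : List (String × ν)) (d : PySem.Dict String (PySem.Set String)) (k : String)
    (h : (l.map Prod.fst).Nodup) :
    (l.foldl (fun res p => res.insert p.1 (g (res.getD p.1 []) p.2)) d).getD k []
      = match (PySem.Dict.mk l).get? k with
        | some v => g (d.getD k []) v
        | none => d.getD k [] := by
  induction l generalizing d with
  | nil => simp [PySem.Dict.get?]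
  | cons p rest ih =>
    simp only [List.map_cons, List.nodup_cons] at h
    rw [List.foldl_cons, ih _ h.2, PySem.Dict.get?_mk_cons]
    by_cases hk : p.1 = k
    · subst hk
      have hnone : (PySem.Dict.mk rest).get? p.1 = none := by
        rw [PySem.Dict.get?_eq_none_iff_not_mem_keys]
        simpa using h.1
      simp [hnone, PySem.Dict.getD_insert_self]
    · have hb : (p.1 == k) = false := by simp [hk]
      rw [hb]
      cases hrest : (PySem.Dict.mk rest).get? k <;>
        simp [PySem.Dict.getD_insert, Ne.symm hk]

theorem full_wait_bind_ids_spec : Claim_equal_full_wait_bind_ids := by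
  intro wbi conds alt _ hpre
  obtain ⟨h1, h2, h3, -⟩ := hpre
  show full_wait_bind_ids wbi conds alt = full_wait_bind_ids_alt wbi conds alt
  unfold full_wait_bind_ids full_wait_bind_ids_alt
  set d1 := wbi.foldl (fun res p =>
      res.insert p.1 (p.2.foldl (fun s q => PySem.Set.add s q.1) (res.getD p.1 []))) PySem.Dict.empty with hd1
  set d2 := conds.foldl (fun res p =>
      res.insert p.1 (p.2.foldl (fun s deps => deps.foldl (fun s q => PySem.Set.add s q.1) s) (res.getD p.1 []))) d1 with hd2
  set d3 := alt.foldl (fun res p =>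
      res.insert p.1 (p.2.foldl (fun s nd => nd.2.foldl (fun s deps => deps.foldl (fun s q => PySem.Set.add s q.1) s) s) (res.getD p.1 []))) d2 with hd3
  have hn3 : d3.keys.Nodup := by
    rw [hd3, hd2, hd1]
    exact PySem.Dict.nodup_keys_foldl_insert_key _ _ _ _
      (PySem.Dict.nodup_keys_foldl_insert_key _ _ _ _
        (PySem.Dict.nodup_keys_foldl_insert_key _ _ _ _ PySem.Dict.nodup_keys_empty))
  have hkeys : d3.keys = PySem.Set.ofList (wbi.map Prod.fst ++ conds.map Prod.fst ++ alt.map Prod.fst) := by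
    rw [hd3, hd2, hd1]
    rw [PySem.Dict.keys_foldl_insert_key, PySem.Dict.keys_foldl_insert_key,
        PySem.Dict.keys_foldl_insert_key]
    rw [PySem.Dict.keys_empty, PySem.Set.update_nil_left, ← PySem.Set.ofList_append,
        ← PySem.Set.ofList_append]
  have hget : ∀ k, d3.getD k [] = pvGather wbi conds alt k := by
    intro k
    have e1 : d1.getD k [] = PySem.Set.ofList (((PySem.Dict.mk wbi).getD k []).map Prod.fst) := by
      rw [hd1, pv_foldl_insert_getD (fun s v => v.foldl (fun s q => PySem.Set.add s q.1) s) _ _ _ h1]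
      cases h : (PySem.Dict.mk wbi).get? k with
      | none => simp [h, PySem.Dict.getD_eq_get?_getD]
      | some v =>
        simp only [h, PySem.Dict.getD_eq_get?_getD, PySem.Dict.get?_empty, Option.getD_some,
          Option.getD_none]
        rw [← PySem.Set.update_map_eq_foldl_add, PySem.Set.update_nil_left]
    have e2 : d2.getD k []
        = ((PySem.Dict.mk conds).getD k []).foldl
            (fun s cond_deps => PySem.Set.update s (cond_deps.map Prod.fst)) (d1.getD k []) := by
      rw [hd2, pv_foldl_insert_getD (fun s v => v.foldl (fun s deps => deps.foldl (fun s q => PySem.Set.add s q.1) s) s) _ _ _ h2]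
      cases h : (PySem.Dict.mk conds).get? k with
      | none => simp [h, PySem.Dict.getD_eq_get?_getD]
      | some v =>
        simp only [h, PySem.Dict.getD_eq_get?_getD, Option.getD_some]
        exact PySem.List.foldl_congr_mem _ _ _ _ (fun s deps _ =>
          (PySem.Set.update_map_eq_foldl_add deps Prod.fst s).symm)
    have e3 : d3.getD k []
        = ((PySem.Dict.mk alt).getD k []).foldl
            (fun s nd => nd.2.foldl (fun s alt_deps => PySem.Set.update s (alt_deps.map Prod.fst)) s) (d2.getD k []) := by
      rw [hd3, pv_foldl_insert_getD (fun s v => v.foldl (fun s nd => nd.2.foldl (fun s deps => deps.foldl (fun s q => PySem.Set.add s q.1) s) s) s) _ _ _ h3]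
      cases h : (PySem.Dict.mk alt).get? k with
      | none => simp [h, PySem.Dict.getD_eq_get?_getD]
      | some v =>
        simp only [h, PySem.Dict.getD_eq_get?_getD, Option.getD_some]
        refine PySem.List.foldl_congr_mem _ _ _ _ (fun s nd _ => ?_)
        exact PySem.List.foldl_congr_mem _ _ _ _ (fun s deps _ =>
          (PySem.Set.update_map_eq_foldl_add deps Prod.fst s).symm)
    rw [e3, e2, e1]
    rfl
  rw [PySem.Dict.items_eq_map_keys d3 hn3 [], hkeys]
  exact List.map_congr_left (fun k _ => by rw [hget k])
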